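-- pv_equiv track=rewrite | github.com/RedFantom/gsf-parser | widgets/time_view.py | parse_search_string
-- ===== SOURCE A (Python) =====
-- def parse_search_string(string: str) -> tuple:
--     """Parse a search string into elements"""
--     keywords = ("time:", "source:", "target:", "ability:", "amount:")
--     indices = tuple(map(string.find, keywords))
--     results = tuple()
--     for index, keyword in zip(indices, keywords):
--         if index == -1:
--             results += ("",)
--             continue
--         ends = tuple(i for i in indices if i > index)
--         start, end = index + len(keyword), min(ends if len(ends) != 0 else (-1,))
--         results += (string[start:end] if end != -1 else string[start:],)
--     return results
-- ===== SOURCE B (Python) =====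
-- def parse_search_string(string: str) -> tuple:
--     """Parse a search string into elements"""
--     keywords = ("time:", "source:", "target:", "ability:", "amount:")
--     pairs = [(string.find(k), k) for k in keywords]
--     found = sorted([t for t in pairs if t[0] != -1], key=lambda t: t[0])
--     nexts = [pos for pos, _ in found[1:]] + [None]
--     values = {}
--     for (pos, kw), nxt in zip(found, nexts):
--         values[kw] = string[pos + len(kw):nxt]
--     return tuple(values.get(kw, "") for kw in keywords)
-- ===== Notes on version B (the rewrite author's own statement) =====
-- stated objective: alternative
-- what changed: Instead of re-scanning all keyword indices for every keyword to take the min of those greater (A), B sorts the found (position, keyword) pairs once and sweeps them in one pass, slicing each value up to the next sorted position and returning results over the original keyword order via a dict, defaulting to the empty string for keywords never found.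
import Mathlib
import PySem

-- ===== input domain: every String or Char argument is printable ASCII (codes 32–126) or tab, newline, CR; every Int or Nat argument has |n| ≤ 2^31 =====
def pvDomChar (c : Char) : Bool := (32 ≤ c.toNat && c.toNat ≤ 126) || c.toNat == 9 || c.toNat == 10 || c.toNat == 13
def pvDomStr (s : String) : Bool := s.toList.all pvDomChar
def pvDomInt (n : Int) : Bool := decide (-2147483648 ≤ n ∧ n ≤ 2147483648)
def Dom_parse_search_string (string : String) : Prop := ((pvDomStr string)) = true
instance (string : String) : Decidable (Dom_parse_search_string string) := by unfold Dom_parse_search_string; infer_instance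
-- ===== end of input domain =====

-- B replaces A's per-keyword rescan (min over all indices greater than this one, recomputed for
-- each keyword) by one sort of the found (position, keyword) pairs and a single sweep in which each
-- value ends where the next sorted keyword begins; objective: alternative (single sorted sweep).

-- ===== PORT A =====
def parse_search_string (string : String) : List String :=
  let keywords : List String := ["time:", "source:", "target:", "ability:", "amount:"]
  let indices : List Int := keywords.map (fun k => PySem.Str.find string k)
  (indices.zip keywords).foldl (fun results p =>
    if p.1 = -1 then results ++ [""]
    else
      let ends : List Int := indices.filter (fun i => p.1 < i)
      let start : Int := p.1 + PySem.Str.len p.2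
      let e : Int := PySem.List.minD (if ends.length ≠ 0 then ends else [-1]) (fun x => x) (-1)
      results ++ [if e ≠ -1 then PySem.Str.slice string (some start) (some e)
                  else PySem.Str.slice string (some start) none]) []

-- ===== PORT B =====
def parse_search_string_alt (string : String) : List String :=
  let keywords : List String := ["time:", "source:", "target:", "ability:", "amount:"]
  let pairs : List (Int × String) := keywords.map (fun k => (PySem.Str.find string k, k))
  let found : List (Int × String) :=
    PySem.List.sorted (pairs.filter (fun t => t.1 ≠ -1)) (fun t => t.1) false
  let nexts : List (Option Int) :=
    (PySem.List.slice found (some 1) none).map (fun t => some t.1) ++ [none]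
  let values : PySem.Dict String String :=
    (found.zip nexts).foldl
      (fun d q => d.insert q.1.2 (PySem.Str.slice string (some (q.1.1 + PySem.Str.len q.1.2)) q.2))
      PySem.Dict.empty
  keywords.map (fun k => values.getD k "")

-- ===== PRECONDITION & SPEC =====
def Spec_parse_search_string (string : String) (out : List String) : Prop := out = parse_search_string_alt string
instance (string : String) (out : List String) : Decidable (Spec_parse_search_string string out) := by unfold Spec_parse_search_string; infer_instance

-- ===== CLAIM (what is proved, stated in full; the proofs are below) =====
def Claim_equal_parse_search_string : Prop := ∀ (string : String), Dom_parse_search_string string → Spec_parse_search_string string (parse_search_string string)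

-- ===== LEMMAS AND PROOFS =====

-- proof-side names for the pieces of the two ports (definitionally equal to them)
def pvKW : List String := ["time:", "source:", "target:", "ability:", "amount:"]

def pvPairs (s : String) : List (Int × String) := pvKW.map (fun k => (PySem.Str.find s k, k))

def pvFound (s : String) : List (Int × String) :=
  PySem.List.sorted ((pvPairs s).filter (fun t => t.1 ≠ -1)) (fun t => t.1) false

def pvNexts (s : String) : List (Option Int) :=
  (PySem.List.slice (pvFound s) (some 1) none).map (fun t => some t.1) ++ [none]

def pvValues (s : String) : PySem.Dict String String :=
  ((pvFound s).zip (pvNexts s)).foldl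
    (fun d q => d.insert q.1.2 (PySem.Str.slice s (some (q.1.1 + PySem.Str.len q.1.2)) q.2))
    PySem.Dict.empty

def pvElse (s : String) (p : Int × String) : String :=
  let ends : List Int := (pvKW.map (fun k => PySem.Str.find s k)).filter (fun i => p.1 < i)
  let start : Int := p.1 + PySem.Str.len p.2
  let e : Int := PySem.List.minD (if ends.length ≠ 0 then ends else [-1]) (fun x => x) (-1)
  if e ≠ -1 then PySem.Str.slice s (some start) (some e)
  else PySem.Str.slice s (some start) none

def pvAVal (s : String) (p : Int × String) : String :=
  if p.1 = -1 then "" else pvElse s p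

lemma pv_foldl_if {α β : Type} (p : α → Prop) [DecidablePred p] (f g : α → β) :
    ∀ (l : List α) (acc : List β),
    l.foldl (fun acc x => if p x then acc ++ [f x] else acc ++ [g x]) acc
      = acc ++ l.map (fun x => if p x then f x else g x)
  | [], acc => by simp
  | x :: l, acc => by
      by_cases h : p x <;>
        simp [h, pv_foldl_if p f g l, List.append_assoc]

lemma pvA_eq (s : String) : parse_search_string s = (pvPairs s).map (pvAVal s) := by
  calc parse_search_string s
      = (pvPairs s).foldl
          (fun acc p => if p.1 = -1 then acc ++ [(fun _ : Int × String => "") p]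
                        else acc ++ [pvElse s p]) [] := by rfl
    _ = [] ++ (pvPairs s).map (fun p => if p.1 = -1 then (fun _ : Int × String => "") p
                        else pvElse s p) := pv_foldl_if _ _ _ _ _
    _ = (pvPairs s).map (pvAVal s) := by simp [pvAVal]

lemma pvB_eq (s : String) : parse_search_string_alt s = pvKW.map (fun k => (pvValues s).getD k "") := rfl

-- no two distinct keywords are found at the same position (none is a prefix of another)
lemma pv_find_inj (s : String) : ∀ k ∈ pvKW, ∀ k' ∈ pvKW, k ≠ k' →
    (0 : Int) ≤ PySem.Str.find s k → PySem.Str.find s k ≠ PySem.Str.find s k' := by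
  intro k hk k' hk' hne h0 heq
  simp only [PySem.Str.find_eq] at h0 heq
  have h0' : (0 : Int) ≤ PySem.Chars.find s.toList k'.toList := heq ▸ h0
  have p1 := (PySem.Chars.find_spec h0).1
  have p2 := (PySem.Chars.find_spec h0').1
  rw [← heq] at p2
  have hor := List.prefix_or_prefix_of_prefix p1 p2
  clear p1 p2 heq h0 h0'
  fin_cases hk <;> fin_cases hk' <;> first
    | exact hne rfl
    | (revert hor; decide)

-- zip-with-next, structurally
def pvZN : List (Int × String) → List ((Int × String) × Option Int)
  | [] => []
  | [x] => [(x, none)]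
  | x :: y :: r => (x, some y.1) :: pvZN (y :: r)

lemma pvZN_eq : ∀ f : List (Int × String),
    f.zip (f.tail.map (fun t => some t.1) ++ [none]) = pvZN f
  | [] => rfl
  | [x] => rfl
  | x :: y :: r => by
      simpa [pvZN, List.zip_cons_cons] using pvZN_eq (y :: r)

lemma pvZN_mem : ∀ (l₁ : List (Int × String)) (x : Int × String) (l₂ : List (Int × String)),
    (x, (match l₂ with | [] => none | h :: _ => some h.1)) ∈ pvZN (l₁ ++ x :: l₂)
  | [], x, [] => by simp [pvZN]
  | [], x, h :: t => by simp [pvZN]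
  | a :: l₁, x, l₂ => by
      have ih := pvZN_mem l₁ x l₂
      cases hl : l₁ ++ x :: l₂ with
      | nil => simp at hl
      | cons b r =>
          rw [hl] at ih
          simp only [List.cons_append, hl, pvZN]
          exact List.mem_cons_of_mem _ ih

-- the found list is strictly increasing in position
lemma pv_found_pairwise (s : String) : (pvFound s).Pairwise (fun a b => a.1 < b.1) := by
  have hle := PySem.List.sorted_pairwise ((pvPairs s).filter (fun t => t.1 ≠ -1)) (fun t => t.1)
  have hR : (pvPairs s).Pairwise (fun a b => a.1 ≠ -1 → b.1 ≠ -1 → a.1 ≠ b.1) := by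
    rw [pvPairs, List.pairwise_map]
    have hnd : pvKW.Pairwise (· ≠ ·) := by decide
    refine hnd.imp_of_mem ?_
    intro a b ha hb hab h1 _ 
    refine pv_find_inj s a ha b hb hab ?_
    have := PySem.Chars.neg_one_le_find s.toList a.toList
    rw [PySem.Str.find_eq]
    simp only [PySem.Str.find_eq] at h1
    omega
  have hflt : ((pvPairs s).filter (fun t => t.1 ≠ -1)).Pairwise (fun a b => a.1 ≠ b.1) := by
    rw [List.pairwise_filter]
    refine hR.imp_of_mem ?_
    intro a b _ _ h ha hb
    exact h (by simpa using ha) (by simpa using hb)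
  have hne : (pvFound s).Pairwise (fun a b => a.1 ≠ b.1) := by
    have hperm := PySem.List.sorted_perm ((pvPairs s).filter (fun t => t.1 ≠ -1)) (fun t => t.1) false
    have h2 : (((pvPairs s).filter (fun t => t.1 ≠ -1)).map Prod.fst).Nodup := by
      rw [List.nodup_iff_pairwise_ne, List.pairwise_map]; exact hflt
    have h3 : ((pvFound s).map Prod.fst).Nodup := ((hperm.map Prod.fst).symm.nodup h2)
    rw [List.nodup_iff_pairwise_ne, List.pairwise_map] at h3
    exact h3
  exact (hle.and hne).imp (fun h => lt_of_le_of_ne h.1 h.2)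

-- keywords appearing in found are exactly the keywords with find ≠ -1, each once
lemma pv_found_snd_nodup (s : String) : ((pvFound s).map Prod.snd).Nodup := by
  have hperm := PySem.List.sorted_perm ((pvPairs s).filter (fun t => t.1 ≠ -1)) (fun t => t.1) false
  have h1 : ((pvPairs s).map Prod.snd).Nodup := by
    rw [pvPairs, List.map_map]
    have he : (Prod.snd ∘ fun k => (PySem.Str.find s k, k)) = id := rfl
    rw [he, List.map_id]
    decide
  have h2 : ((((pvPairs s).filter (fun t => t.1 ≠ -1))).map Prod.snd).Nodup :=
    ((List.filter_sublist (p := fun t => decide (t.1 ≠ -1))).map Prod.snd).nodup h1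
  exact ((hperm.map Prod.snd).symm.nodup h2)

lemma pv_keys_nodup (s : String) : (pvValues s).keys.Nodup :=
  PySem.Dict.nodup_keys_foldl_insert_key _ _ _ _ (by simp [PySem.Dict.keys_empty])

lemma pv_items (s : String) : (pvValues s).items =
    (pvZN (pvFound s)).map
      (fun q => (q.1.2, PySem.Str.slice s (some (q.1.1 + PySem.Str.len q.1.2)) q.2)) := by
  rw [pvValues, pvNexts, PySem.List.slice_from_one, pvZN_eq]
  rw [PySem.Dict.items_foldl_insert_fresh]
  · rfl
  · intro a _; simp [PySem.Dict.contains_empty]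
  · have key : ((pvZN (pvFound s)).map (fun q => q.1.2)) = (pvFound s).map Prod.snd := by
      rw [← pvZN_eq]
      have hlen : (pvFound s).length ≤ (((pvFound s).tail.map (fun t : Int × String => some t.1)) ++ [(none : Option Int)]).length := by
        simp [List.length_tail]; omega
      have hfz := List.map_fst_zip (l₁ := pvFound s) (l₂ := ((pvFound s).tail.map (fun t : Int × String => some t.1)) ++ [(none : Option Int)]) hlen
      calc (((pvFound s).zip (((pvFound s).tail.map (fun t : Int × String => some t.1)) ++ [(none : Option Int)])).map (fun q => q.1.2))
          = ((((pvFound s).zip (((pvFound s).tail.map (fun t : Int × String => some t.1)) ++ [(none : Option Int)])).map Prod.fst).map Prod.snd) := by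
            rw [List.map_map]; rfl
        _ = (pvFound s).map Prod.snd := by rw [hfz]
    rw [key]
    exact pv_found_snd_nodup s

-- main per-keyword lemma
lemma pv_key (s : String) (k : String) (hk : k ∈ pvKW) :
    pvAVal s (PySem.Str.find s k, k) = (pvValues s).getD k "" := by
  by_cases hmiss : PySem.Str.find s k = -1
  · -- keyword not found: A gives "", B's dict has no entry for k
    have hkeys : k ∉ (pvValues s).keys := by
      intro hmem
      have : k ∈ (pvValues s).items.map Prod.fst := hmem
      rw [pv_items, List.map_map] at this
      have : k ∈ (pvZN (pvFound s)).map (fun q => q.1.2) := by simpa using this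
      obtain ⟨q, hq, hqk⟩ := List.mem_map.1 this
      -- q.1 ∈ pvFound s
      have hq1 : q.1 ∈ pvFound s := by
        rw [← pvZN_eq] at hq
        exact (List.of_mem_zip hq).1
      have hq2 : q.1 ∈ (pvPairs s).filter (fun t => t.1 ≠ -1) := (PySem.List.mem_sorted _ _ _ _).1 hq1
      rw [List.mem_filter] at hq2
      obtain ⟨hmem', hne⟩ := hq2
      rw [pvPairs, List.mem_map] at hmem'
      obtain ⟨k', hk'K, hk'⟩ := hmem'
      have hks : k' = k := by rw [← hk'] at hqk; simpa using hqk
      rw [hks] at hk'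
      rw [← hk'] at hne
      simp only [decide_eq_true_eq] at hne
      exact hne hmiss
    have hcon : (pvValues s).contains k = false := by
      by_contra h
      exact hkeys ((PySem.Dict.contains_iff_mem_keys _ _).1 (by simpa using h))
    rw [PySem.Dict.getD_of_not_contains _ _ hcon]
    simp only [pvAVal]
    rw [if_pos hmiss]

  · -- keyword found at i
    set i := PySem.Str.find s k with hi
    have h0 : (0 : Int) ≤ i := by
      have := PySem.Chars.neg_one_le_find s.toList k.toList
      rw [hi, PySem.Str.find_eq]
      simp only [hi, PySem.Str.find_eq] at hmiss
      omega
    have hmem : (i, k) ∈ pvFound s := by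
      rw [pvFound, PySem.List.mem_sorted, List.mem_filter]
      refine ⟨?_, by simpa using hmiss⟩
      rw [pvPairs, List.mem_map]
      exact ⟨k, hk, rfl⟩
    obtain ⟨l₁, l₂, hsplit⟩ := List.append_of_mem hmem
    have hpw := pv_found_pairwise s
    rw [hsplit, List.pairwise_append] at hpw
    obtain ⟨hpw1, hpw2, hcross⟩ := hpw
    rw [List.pairwise_cons] at hpw2
    obtain ⟨hl₂gt, hl₂pw⟩ := hpw2
    have hl₁lt : ∀ x ∈ l₁, x.1 < i := fun x hx => hcross x hx (i, k) (List.mem_cons_self)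
    -- the dict entry for k, for whichever next-option applies
    have hentry : ∀ nxt : Option Int, ((i, k), nxt) ∈ pvZN (pvFound s) →
        (pvValues s).getD k "" = PySem.Str.slice s (some (i + PySem.Str.len k)) nxt := by
      intro nxt hzmem
      have hitem : (k, PySem.Str.slice s (some (i + PySem.Str.len k)) nxt) ∈ (pvValues s).items := by
        rw [pv_items]
        exact List.mem_map.2 ⟨((i, k), nxt), hzmem, rfl⟩
      exact PySem.Dict.getD_of_mem_items (pvValues s) hitem (pv_keys_nodup s) ""
    -- now compute A's value
    have hendsperm : ((pvKW.map (fun k => PySem.Str.find s k)).filter (fun j => i < j)).Perm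
        (l₂.map Prod.fst) := by
      have e1 : (pvKW.map (fun k => PySem.Str.find s k)).filter (fun j => i < j)
          = ((pvPairs s).filter (fun t => i < t.1)).map Prod.fst := by
        simp only [pvPairs, List.filter_map, List.map_map]
        rfl
      have e2 : (pvPairs s).filter (fun t => i < t.1)
          = ((pvPairs s).filter (fun t => t.1 ≠ -1)).filter (fun t => i < t.1) := by
        rw [List.filter_filter]
        apply List.filter_congr
        intro t _
        by_cases h : i < t.1
        · simp [h]; omega
        · simp [h]
      have hperm : ((pvPairs s).filter (fun t => t.1 ≠ -1)).Perm (pvFound s) :=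
        (PySem.List.sorted_perm ((pvPairs s).filter (fun t => t.1 ≠ -1)) (fun t => t.1) false).symm
      have e3 : (pvFound s).filter (fun t => i < t.1) = l₂ := by
        rw [hsplit, List.filter_append, List.filter_cons]
        have g1 : l₁.filter (fun t => i < t.1) = [] := by
          rw [List.filter_eq_nil_iff]
          intro x hx
          have := hl₁lt x hx
          simp; omega
        have g2 : ¬ (i < i) := lt_irrefl i
        have g3 : l₂.filter (fun t => i < t.1) = l₂ := by
          rw [List.filter_eq_self]
          intro x hx
          have := hl₂gt x hx
          simpa using this
        simp [g1, g3]
      rw [e1, e2]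
      have := (hperm.filter (fun t => i < t.1)).map Prod.fst
      rw [e3] at this
      exact this
    cases hl₂ : l₂ with
    | nil =>
        -- no later keyword: A slices to the end, B's next is none
        rw [hl₂] at hendsperm
        have hends : (pvKW.map (fun k => PySem.Str.find s k)).filter (fun j => i < j) = [] := by
          simpa using hendsperm.eq_nil
        have hzmem : ((i, k), (none : Option Int)) ∈ pvZN (pvFound s) := by
          rw [hsplit, hl₂]; exact pvZN_mem l₁ (i, k) []
        rw [hentry none hzmem]
        simp only [pvAVal]
        rw [if_neg hmiss]
        simp only [pvElse]
        rw [hends]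
        norm_num [PySem.List.minD, PySem.List.min?]
    | cons h t =>
        rw [hl₂] at hendsperm hl₂gt
        have hl₂pw' : List.Pairwise (fun a b : Int × String => a.1 < b.1) (h :: t) := hl₂ ▸ hl₂pw
        set ends := (pvKW.map (fun k => PySem.Str.find s k)).filter (fun j => i < j) with hends
        have hne : ends ≠ [] := by
          intro hnil
          rw [hnil] at hendsperm
          exact absurd hendsperm.symm.eq_nil (by simp)
        have hlen : ends.length ≠ 0 := fun h' => hne (List.eq_nil_of_length_eq_zero h')
        have hmin : PySem.List.minD ends (fun x => x) (-1) = h.1 := by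
          have hminmem : PySem.List.minD ends (fun x => x) (-1) ∈ ends :=
            PySem.List.minD_mem ends _ _ hne
          have hh1mem : h.1 ∈ ends := hendsperm.symm.subset (by simp)
          have h1le : ∀ y ∈ ends, h.1 ≤ y := by
            intro y hy
            have : y ∈ (h :: t).map Prod.fst := hendsperm.subset hy
            simp only [List.map_cons, List.mem_cons] at this
            rcases this with rfl | hy'
            · exact le_refl _
            · obtain ⟨x, hx, rfl⟩ := List.mem_map.1 hy'
              exact le_of_lt (List.rel_of_pairwise_cons hl₂pw' hx)
          exact le_antisymm (PySem.List.minD_id_le ends _ _ hh1mem) (h1le _ hminmem)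
        have hgt : i < h.1 := hl₂gt h (by simp)
        have hneq : h.1 ≠ -1 := by omega
        have hzmem : ((i, k), (some h.1 : Option Int)) ∈ pvZN (pvFound s) := by
          rw [hsplit, hl₂]; exact pvZN_mem l₁ (i, k) (h :: t)
        rw [hentry (some h.1) hzmem]
        simp only [pvAVal]
        rw [if_neg hmiss]
        simp only [pvElse]
        rw [← hends, if_pos hlen, hmin, if_pos hneq]

-- ===== VERDICT (by name: the statement is the Claim_ definition above) =====
theorem parse_search_string_spec : Claim_equal_parse_search_string := by
  intro s _
  unfold Spec_parse_search_string
  rw [pvA_eq, pvB_eq, pvPairs, List.map_map]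
  apply List.map_congr_left
  intro k hk
  exact pv_key s k hk
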